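-- pv_equiv track=rewrite | github.com/ThomasZwart92/cocoindex-data-ingestion | app/processors/entity_extractor.py | _determine_subcategory
-- ===== SOURCE A (Python) =====
-- def _determine_subcategory(entity_type: str, name: str) -> str:
--     """Determine a subcategory within the entity type"""
--     entity_type = entity_type.upper()
--     name_lower = name.lower()
--
--     if entity_type == "COMPONENT":
--         if any(term in name_lower for term in ["cable", "connector", "wire"]):
--             return "electrical"
--         elif any(term in name_lower for term in ["display", "screen", "monitor"]):
--             return "display"
--         elif any(term in name_lower for term in ["sensor", "detector"]):
--             return "sensor"
--         else:
--             return "general"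
--
--     elif entity_type == "CHEMICAL":
--         if "acid" in name_lower:
--             return "acid"
--         elif "alcohol" in name_lower:
--             return "alcohol"
--         elif any(term in name_lower for term in ["oxide", "hydroxide"]):
--             return "compound"
--         else:
--             return "substance"
--
--     elif entity_type == "PROCEDURE":
--         if any(term in name_lower for term in ["clean", "wash", "wipe"]):
--             return "cleaning"
--         elif any(term in name_lower for term in ["test", "verify", "check"]):
--             return "testing"
--         elif any(term in name_lower for term in ["install", "setup", "configure"]):
--             return "installation"
--         else:
--             return "process"
--
--     elif entity_type == "PROBLEM":
--         if any(term in name_lower for term in ["screen", "display", "visual"]):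
--             return "display_issue"
--         elif any(term in name_lower for term in ["connect", "cable", "wire"]):
--             return "connection_issue"
--         elif any(term in name_lower for term in ["error", "fail", "crash"]):
--             return "error"
--         else:
--             return "symptom"
--
--     elif entity_type == "STATE":
--         if any(term in name_lower for term in ["active", "running", "operational"]):
--             return "active"
--         elif any(term in name_lower for term in ["locked", "blocked", "frozen"]):
--             return "blocked"
--         elif any(term in name_lower for term in ["failed", "error", "broken"]):
--             return "failed"
--         else:
--             return "operational"
--
--     elif entity_type == "CONDITION":
--         if any(term in name_lower for term in ["corrosion", "rust", "oxidation"]):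
--             return "corrosion"
--         elif any(term in name_lower for term in ["contamination", "dirty", "debris"]):
--             return "contamination"
--         elif any(term in name_lower for term in ["wear", "worn", "degraded"]):
--             return "wear"
--         else:
--             return "physical"
--
--     return "general"
-- ===== SOURCE B (Python) =====
-- # Flat rule list: (entity_type, keyword, subcategory), ordered so that for each
-- # type the triples appear in the original rules' priority order.
-- RULES = [
--     ("COMPONENT", "cable", "electrical"),
--     ("COMPONENT", "connector", "electrical"),
--     ("COMPONENT", "wire", "electrical"),
--     ("COMPONENT", "display", "display"),
--     ("COMPONENT", "screen", "display"),
--     ("COMPONENT", "monitor", "display"),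
--     ("COMPONENT", "sensor", "sensor"),
--     ("COMPONENT", "detector", "sensor"),
--     ("CHEMICAL", "acid", "acid"),
--     ("CHEMICAL", "alcohol", "alcohol"),
--     ("CHEMICAL", "oxide", "compound"),
--     ("CHEMICAL", "hydroxide", "compound"),
--     ("PROCEDURE", "clean", "cleaning"),
--     ("PROCEDURE", "wash", "cleaning"),
--     ("PROCEDURE", "wipe", "cleaning"),
--     ("PROCEDURE", "test", "testing"),
--     ("PROCEDURE", "verify", "testing"),
--     ("PROCEDURE", "check", "testing"),
--     ("PROCEDURE", "install", "installation"),
--     ("PROCEDURE", "setup", "installation"),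
--     ("PROCEDURE", "configure", "installation"),
--     ("PROBLEM", "screen", "display_issue"),
--     ("PROBLEM", "display", "display_issue"),
--     ("PROBLEM", "visual", "display_issue"),
--     ("PROBLEM", "connect", "connection_issue"),
--     ("PROBLEM", "cable", "connection_issue"),
--     ("PROBLEM", "wire", "connection_issue"),
--     ("PROBLEM", "error", "error"),
--     ("PROBLEM", "fail", "error"),
--     ("PROBLEM", "crash", "error"),
--     ("STATE", "active", "active"),
--     ("STATE", "running", "active"),
--     ("STATE", "operational", "active"),
--     ("STATE", "locked", "blocked"),
--     ("STATE", "blocked", "blocked"),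
--     ("STATE", "frozen", "blocked"),
--     ("STATE", "failed", "failed"),
--     ("STATE", "error", "failed"),
--     ("STATE", "broken", "failed"),
--     ("CONDITION", "corrosion", "corrosion"),
--     ("CONDITION", "rust", "corrosion"),
--     ("CONDITION", "oxidation", "corrosion"),
--     ("CONDITION", "contamination", "contamination"),
--     ("CONDITION", "dirty", "contamination"),
--     ("CONDITION", "debris", "contamination"),
--     ("CONDITION", "wear", "wear"),
--     ("CONDITION", "worn", "wear"),
--     ("CONDITION", "degraded", "wear"),
-- ]
--
-- DEFAULTS = {
--     "COMPONENT": "general",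
--     "CHEMICAL": "substance",
--     "PROCEDURE": "process",
--     "PROBLEM": "symptom",
--     "STATE": "operational",
--     "CONDITION": "physical",
-- }
--
--
-- def _determine_subcategory(entity_type: str, name: str) -> str:
--     et = entity_type.upper()
--     nl = name.lower()
--     return next((sub for t, term, sub in RULES if t == et and term in nl),
--                 DEFAULTS.get(et, "general"))
-- ===== Notes on version B (the rewrite author's own statement) =====
-- stated objective: alternative
-- what changed: Replaced the six-way if/elif cascade of grouped any()-checks with one linear first-match scan of a single flat (type, keyword, subcategory) triple list plus a separate defaults map; correctness holds because restricting the flat list to one type preserves the original per-type keyword priority order.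
import Mathlib
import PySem

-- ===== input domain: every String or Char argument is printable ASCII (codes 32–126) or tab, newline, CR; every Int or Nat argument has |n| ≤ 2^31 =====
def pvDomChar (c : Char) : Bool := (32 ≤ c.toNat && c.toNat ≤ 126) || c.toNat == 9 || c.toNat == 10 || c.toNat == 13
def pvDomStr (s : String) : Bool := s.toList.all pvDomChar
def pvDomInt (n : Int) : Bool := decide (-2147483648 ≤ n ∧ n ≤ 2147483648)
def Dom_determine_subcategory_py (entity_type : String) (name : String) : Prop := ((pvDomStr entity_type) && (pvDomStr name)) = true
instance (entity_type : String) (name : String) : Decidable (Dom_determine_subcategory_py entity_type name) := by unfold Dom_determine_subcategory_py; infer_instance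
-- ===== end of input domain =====

-- B replaces A's six-way if/elif cascade of grouped any()-checks by one first-match scan
-- over a flat (type, keyword, subcategory) triple list plus a separate defaults map (objective: alternative).

-- ===== PORT A =====
def determine_subcategory_py (entity_type : String) (name : String) : String :=
  let et := PySem.Str.upper entity_type
  let name_lower := PySem.Str.lower name
  if et = "COMPONENT" then
    if ["cable", "connector", "wire"].any (fun t => PySem.Str.isIn t name_lower) then "electrical"
    else if ["display", "screen", "monitor"].any (fun t => PySem.Str.isIn t name_lower) then "display"
    else if ["sensor", "detector"].any (fun t => PySem.Str.isIn t name_lower) then "sensor"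
    else "general"
  else if et = "CHEMICAL" then
    if PySem.Str.isIn "acid" name_lower then "acid"
    else if PySem.Str.isIn "alcohol" name_lower then "alcohol"
    else if ["oxide", "hydroxide"].any (fun t => PySem.Str.isIn t name_lower) then "compound"
    else "substance"
  else if et = "PROCEDURE" then
    if ["clean", "wash", "wipe"].any (fun t => PySem.Str.isIn t name_lower) then "cleaning"
    else if ["test", "verify", "check"].any (fun t => PySem.Str.isIn t name_lower) then "testing"
    else if ["install", "setup", "configure"].any (fun t => PySem.Str.isIn t name_lower) then "installation"
    else "process"
  else if et = "PROBLEM" then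
    if ["screen", "display", "visual"].any (fun t => PySem.Str.isIn t name_lower) then "display_issue"
    else if ["connect", "cable", "wire"].any (fun t => PySem.Str.isIn t name_lower) then "connection_issue"
    else if ["error", "fail", "crash"].any (fun t => PySem.Str.isIn t name_lower) then "error"
    else "symptom"
  else if et = "STATE" then
    if ["active", "running", "operational"].any (fun t => PySem.Str.isIn t name_lower) then "active"
    else if ["locked", "blocked", "frozen"].any (fun t => PySem.Str.isIn t name_lower) then "blocked"
    else if ["failed", "error", "broken"].any (fun t => PySem.Str.isIn t name_lower) then "failed"
    else "operational"
  else if et = "CONDITION" then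
    if ["corrosion", "rust", "oxidation"].any (fun t => PySem.Str.isIn t name_lower) then "corrosion"
    else if ["contamination", "dirty", "debris"].any (fun t => PySem.Str.isIn t name_lower) then "contamination"
    else if ["wear", "worn", "degraded"].any (fun t => PySem.Str.isIn t name_lower) then "wear"
    else "physical"
  else "general"

-- ===== PORT B =====
-- flat rule list RULES of Source B: (entity_type, keyword, subcategory)
def pvRULES : List (String × String × String) :=
  [ ("COMPONENT", "cable", "electrical"),
    ("COMPONENT", "connector", "electrical"),
    ("COMPONENT", "wire", "electrical"),
    ("COMPONENT", "display", "display"),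
    ("COMPONENT", "screen", "display"),
    ("COMPONENT", "monitor", "display"),
    ("COMPONENT", "sensor", "sensor"),
    ("COMPONENT", "detector", "sensor"),
    ("CHEMICAL", "acid", "acid"),
    ("CHEMICAL", "alcohol", "alcohol"),
    ("CHEMICAL", "oxide", "compound"),
    ("CHEMICAL", "hydroxide", "compound"),
    ("PROCEDURE", "clean", "cleaning"),
    ("PROCEDURE", "wash", "cleaning"),
    ("PROCEDURE", "wipe", "cleaning"),
    ("PROCEDURE", "test", "testing"),
    ("PROCEDURE", "verify", "testing"),
    ("PROCEDURE", "check", "testing"),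
    ("PROCEDURE", "install", "installation"),
    ("PROCEDURE", "setup", "installation"),
    ("PROCEDURE", "configure", "installation"),
    ("PROBLEM", "screen", "display_issue"),
    ("PROBLEM", "display", "display_issue"),
    ("PROBLEM", "visual", "display_issue"),
    ("PROBLEM", "connect", "connection_issue"),
    ("PROBLEM", "cable", "connection_issue"),
    ("PROBLEM", "wire", "connection_issue"),
    ("PROBLEM", "error", "error"),
    ("PROBLEM", "fail", "error"),
    ("PROBLEM", "crash", "error"),
    ("STATE", "active", "active"),
    ("STATE", "running", "active"),
    ("STATE", "operational", "active"),
    ("STATE", "locked", "blocked"),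
    ("STATE", "blocked", "blocked"),
    ("STATE", "frozen", "blocked"),
    ("STATE", "failed", "failed"),
    ("STATE", "error", "failed"),
    ("STATE", "broken", "failed"),
    ("CONDITION", "corrosion", "corrosion"),
    ("CONDITION", "rust", "corrosion"),
    ("CONDITION", "oxidation", "corrosion"),
    ("CONDITION", "contamination", "contamination"),
    ("CONDITION", "dirty", "contamination"),
    ("CONDITION", "debris", "contamination"),
    ("CONDITION", "wear", "wear"),
    ("CONDITION", "worn", "wear"),
    ("CONDITION", "degraded", "wear") ]

def pvDEFAULTS : PySem.Dict String String := PySem.Dict.mk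
  [ ("COMPONENT", "general"),
    ("CHEMICAL", "substance"),
    ("PROCEDURE", "process"),
    ("PROBLEM", "symptom"),
    ("STATE", "operational"),
    ("CONDITION", "physical") ]

-- the next((sub for t, term, sub in RULES if t == et and term in nl), default) of Source B
def pvScan (et : String) (nl : String) : List (String × String × String) → String → String
  | [], dflt => dflt
  | (t, term, sub) :: rest, dflt =>
      if t = et ∧ PySem.Str.isIn term nl then sub else pvScan et nl rest dflt

def determine_subcategory_py_alt (entity_type : String) (name : String) : String :=
  let et := PySem.Str.upper entity_type
  let nl := PySem.Str.lower name
  pvScan et nl pvRULES (pvDEFAULTS.getD et "general")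

-- ===== PRECONDITION & SPEC =====
def Spec_determine_subcategory_py (entity_type : String) (name : String) (out : String) : Prop := out = determine_subcategory_py_alt entity_type name
instance (entity_type : String) (name : String) (out : String) : Decidable (Spec_determine_subcategory_py entity_type name out) := by unfold Spec_determine_subcategory_py; infer_instance

-- ===== CLAIM =====
def Claim_equal_determine_subcategory_py : Prop := ∀ (entity_type : String) (name : String), Dom_determine_subcategory_py entity_type name → Spec_determine_subcategory_py entity_type name (determine_subcategory_py entity_type name)

-- ===== LEMMAS AND PROOFS =====
theorem pvIfOr {α : Type} (a b : Prop) [Decidable a] [Decidable b] (x y : α) :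
    (if a ∨ b then x else y) = if a then x else if b then x else y := by
  by_cases ha : a
  · simp [ha]
  · simp [ha]

-- ===== VERDICT =====
theorem determine_subcategory_py_spec : Claim_equal_determine_subcategory_py := by
  intro entity_type name _
  unfold Spec_determine_subcategory_py determine_subcategory_py determine_subcategory_py_alt
  generalize PySem.Str.upper entity_type = et
  generalize PySem.Str.lower name = nl
  by_cases h1 : et = "COMPONENT"
  · subst h1; simp [pvRULES, pvDEFAULTS, pvScan, PySem.Dict.getD, PySem.Dict.get?]; simp only [pvIfOr]
  by_cases h2 : et = "CHEMICAL"
  · subst h2; simp [pvRULES, pvDEFAULTS, pvScan, PySem.Dict.getD, PySem.Dict.get?, h1]; simp only [pvIfOr]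
  by_cases h3 : et = "PROCEDURE"
  · subst h3; simp [pvRULES, pvDEFAULTS, pvScan, PySem.Dict.getD, PySem.Dict.get?, h1, h2]; simp only [pvIfOr]
  by_cases h4 : et = "PROBLEM"
  · subst h4; simp [pvRULES, pvDEFAULTS, pvScan, PySem.Dict.getD, PySem.Dict.get?, h1, h2, h3]; simp only [pvIfOr]
  by_cases h5 : et = "STATE"
  · subst h5; simp [pvRULES, pvDEFAULTS, pvScan, PySem.Dict.getD, PySem.Dict.get?, h1, h2, h3, h4]; simp only [pvIfOr]
  by_cases h6 : et = "CONDITION"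
  · subst h6; simp [pvRULES, pvDEFAULTS, pvScan, PySem.Dict.getD, PySem.Dict.get?, h1, h2, h3, h4, h5]; simp only [pvIfOr]
  · have f1 : ¬ ("COMPONENT" = et) := fun h => h1 h.symm
    have f2 : ¬ ("CHEMICAL" = et) := fun h => h2 h.symm
    have f3 : ¬ ("PROCEDURE" = et) := fun h => h3 h.symm
    have f4 : ¬ ("PROBLEM" = et) := fun h => h4 h.symm
    have f5 : ¬ ("STATE" = et) := fun h => h5 h.symm
    have f6 : ¬ ("CONDITION" = et) := fun h => h6 h.symm
    have e1 : ("COMPONENT" == et) = false := beq_eq_false_iff_ne.mpr f1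
    have e2 : ("CHEMICAL" == et) = false := beq_eq_false_iff_ne.mpr f2
    have e3 : ("PROCEDURE" == et) = false := beq_eq_false_iff_ne.mpr f3
    have e4 : ("PROBLEM" == et) = false := beq_eq_false_iff_ne.mpr f4
    have e5 : ("STATE" == et) = false := beq_eq_false_iff_ne.mpr f5
    have e6 : ("CONDITION" == et) = false := beq_eq_false_iff_ne.mpr f6
    simp [pvRULES, pvDEFAULTS, pvScan, PySem.Dict.getD, PySem.Dict.get?, e1, e2, e3, e4, e5, e6, f1, f2, f3, f4, f5, f6, h1, h2, h3, h4, h5, h6]
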